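-- pv_equiv track=rewrite | github.com/hunanjsd/translate_learn | statistic/ngram_demo.py | build_ngram_counts
-- ===== SOURCE A (Python) =====
-- from collections import defaultdict
--
-- def build_ngram_counts(processed_corpus, n):
--     """
--     构建 n-gram 和 (n-1)-gram 的频率统计。
--     """
--     ngram_counts = defaultdict(int)
--     context_counts = defaultdict(int)
--
--     for sentence in processed_corpus:
--         for i in range(len(sentence) - n + 1):
--             ngram = tuple(sentence[i:i + n])
--             context = tuple(sentence[i:i + n - 1])
--             ngram_counts[ngram] += 1
--             context_counts[context] += 1
--
--     return ngram_counts, context_counts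
-- ===== SOURCE B (Python) =====
-- from collections import defaultdict
--
-- def build_ngram_counts(processed_corpus, n):
--     """
--     构建 n-gram 和 (n-1)-gram 的频率统计。
--     Two-phase rewrite: first count the n-grams alone, then derive each
--     (n-1)-gram context count by aggregating the n-gram table by prefix.
--     """
--     ngram_counts = defaultdict(int)
--     for sentence in processed_corpus:
--         for i in range(len(sentence) - n + 1):
--             ngram_counts[tuple(sentence[i:i + n])] += 1
--
--     context_counts = defaultdict(int)
--     for ngram, cnt in ngram_counts.items():
--         context_counts[ngram[:-1]] += cnt
--
--     return ngram_counts, context_counts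
-- ===== Notes on version B (the rewrite author's own statement) =====
-- stated objective: alternative
-- what changed: A fills both counters in one fused scan of the corpus; B first builds only the n-gram table in a single scan and then derives every (n-1)-gram context count by aggregating the finished n-gram table by prefix (ngram[:-1]), so the corpus is scanned once per table entry instead of twice per position.
-- outside the precondition, e.g. on build_ngram_counts([['a', 'b', 'c']], 0): A returns ({(): 4}, {('a', 'b'): 1, (): 3}), B returns ({(): 4}, {(): 4})
import Mathlib
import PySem

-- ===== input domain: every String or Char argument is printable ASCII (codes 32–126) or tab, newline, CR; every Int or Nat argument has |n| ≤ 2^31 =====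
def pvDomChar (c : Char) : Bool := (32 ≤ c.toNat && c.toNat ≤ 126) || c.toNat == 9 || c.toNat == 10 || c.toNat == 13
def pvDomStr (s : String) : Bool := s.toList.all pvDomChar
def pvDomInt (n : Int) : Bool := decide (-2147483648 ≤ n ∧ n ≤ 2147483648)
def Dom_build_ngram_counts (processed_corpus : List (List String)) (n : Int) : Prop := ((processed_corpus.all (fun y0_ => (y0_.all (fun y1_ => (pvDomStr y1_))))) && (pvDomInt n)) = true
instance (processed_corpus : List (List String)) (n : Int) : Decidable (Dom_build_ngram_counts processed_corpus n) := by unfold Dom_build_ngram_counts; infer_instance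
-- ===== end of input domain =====

-- B replaces A's fused double loop (which counts n-grams and contexts together) by a
-- two-phase decomposition: build the n-gram counter alone, then aggregate it by prefix.


-- ===== PORT A =====
-- A: one fused pass; both dicts are defaultdict(int), so d[k] += 1 is modify k 0 (+1);
-- the returned dicts are rendered as their association lists (insertion order).
def build_ngram_counts (processed_corpus : List (List String)) (n : Int) : (List (List String × Int)) × (List (List String × Int)) :=
  let r := processed_corpus.foldl
    (fun (st : PySem.Dict (List String) Int × PySem.Dict (List String) Int) sentence =>
      (PySem.List.pyRange 0 ((sentence.length : Int) - n + 1) 1).foldl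
        (fun st i =>
          let ngram := PySem.List.slice sentence (some i) (some (i + n))
          let context := PySem.List.slice sentence (some i) (some (i + n - 1))
          (st.1.modify ngram 0 (· + 1), st.2.modify context 0 (· + 1)))
        st)
    (PySem.Dict.empty, PySem.Dict.empty)
  (r.1.items, r.2.items)

-- ===== PORT B =====
-- B: phase 1 counts only the n-grams; phase 2 folds over the finished table's items,
-- adding each count at the key ngram[:-1] (ported as slice none (some (-1))).
def build_ngram_counts_alt (processed_corpus : List (List String)) (n : Int) : (List (List String × Int)) × (List (List String × Int)) :=
  let ngram_counts := processed_corpus.foldl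
    (fun (d : PySem.Dict (List String) Int) sentence =>
      (PySem.List.pyRange 0 ((sentence.length : Int) - n + 1) 1).foldl
        (fun d i => d.modify (PySem.List.slice sentence (some i) (some (i + n))) 0 (· + 1)) d)
    PySem.Dict.empty
  let context_counts := ngram_counts.items.foldl
    (fun (d : PySem.Dict (List String) Int) p =>
      d.modify (PySem.List.slice p.1 none (some (-1))) 0 (· + p.2))
    PySem.Dict.empty
  (ngram_counts.items, context_counts.items)

-- ===== PRECONDITION & SPEC =====
-- Pre_ restricts to n ≥ 1, the natural domain of an n-gram order: although A returns for
-- every n, for n ≤ 0 the slice stops go negative and Python's wraparound makes A count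
-- accidental tuples of the sentence ends (see the cited example in the claim).
def Pre_build_ngram_counts (processed_corpus : List (List String)) (n : Int) : Prop := 1 ≤ n
instance (processed_corpus : List (List String)) (n : Int) : Decidable (Pre_build_ngram_counts processed_corpus n) := by unfold Pre_build_ngram_counts; infer_instance

def pvWitness_build_ngram_counts : List (List String) × Int := ([["a", "b", "c"], ["b", "c"]], 2)

def Spec_build_ngram_counts (processed_corpus : List (List String)) (n : Int) (out : (List (List String × Int)) × (List (List String × Int))) : Prop := out = build_ngram_counts_alt processed_corpus n
instance (processed_corpus : List (List String)) (n : Int) (out : (List (List String × Int)) × (List (List String × Int))) : Decidable (Spec_build_ngram_counts processed_corpus n out) := by unfold Spec_build_ngram_counts; infer_instance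

-- ===== CLAIM (what is proved, stated in full; the proofs are below) =====
def Claim_equal_build_ngram_counts : Prop := ∀ (processed_corpus : List (List String)) (n : Int), Dom_build_ngram_counts processed_corpus n → Pre_build_ngram_counts processed_corpus n → Spec_build_ngram_counts processed_corpus n (build_ngram_counts processed_corpus n)

-- ===== LEMMAS AND PROOFS =====

theorem slice_to_neg_one {α : Type} (g : List α) :
    PySem.List.slice g none (some (-1)) = g.dropLast := by
  simp [PySem.List.slice, PySem.List.clampIdx, List.dropLast_eq_take]
  rcases g with _ | ⟨x, t⟩
  · simp
  · simp

theorem context_slice_eq (s : List String) (n i : Int) (hn : 1 ≤ n) (hi : 0 ≤ i)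
    (hin : i + n ≤ (s.length : Int)) :
    PySem.List.slice s (some i) (some (i + n - 1)) =
      (PySem.List.slice s (some i) (some (i + n))).dropLast := by
  have h1 : PySem.List.clampIdx s.length i = i.toNat := by
    simp only [PySem.List.clampIdx]; split_ifs <;> omega
  have h2 : PySem.List.clampIdx s.length (i + n) = (i + n).toNat := by
    simp only [PySem.List.clampIdx]; split_ifs <;> omega
  have h3 : PySem.List.clampIdx s.length (i + n - 1) = (i + n).toNat - 1 := by
    simp only [PySem.List.clampIdx]; split_ifs <;> omega
  simp only [PySem.List.slice, h1, h2, h3, List.dropLast_eq_take, List.length_take,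
    List.take_take, List.length_drop]
  congr 1
  omega

theorem foldl_foldl_eq_foldl_flatMap {γ β δ : Type} (l : List γ) (g : γ → List β)
    (f : δ → β → δ) (init : δ) :
    l.foldl (fun acc x => (g x).foldl f acc) init = (l.flatMap g).foldl f init := by
  induction l generalizing init with
  | nil => rfl
  | cons h t ih => simp [List.foldl_append, ih]

theorem ofList_append_singleton {α : Type} [BEq α] (m : List α) (x : α) :
    PySem.Set.ofList (m ++ [x]) = PySem.Set.add (PySem.Set.ofList m) x := by
  simp [PySem.Set.ofList_eq_foldl, List.foldl_append]

theorem ofList_map_ofList {α β : Type} [BEq α] [LawfulBEq α] [BEq β] [LawfulBEq β] (l : List α) (f : α → β) :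
    PySem.Set.ofList ((PySem.Set.ofList l).map f) = PySem.Set.ofList (l.map f) := by
  induction l using List.reverseRecOn with
  | nil => rfl
  | append_singleton t x ih =>
    rw [List.map_append, List.map_singleton, ofList_append_singleton,
        ofList_append_singleton]
    by_cases hx : x ∈ PySem.Set.ofList t
    · rw [PySem.Set.add_of_mem hx, ih]
      have hfx : f x ∈ PySem.Set.ofList (t.map f) := by
        rw [PySem.Set.mem_ofList]
        exact List.mem_map_of_mem ((PySem.Set.mem_ofList t x).1 hx)
      rw [PySem.Set.add_of_mem hfx]
    · rw [PySem.Set.add_of_not_mem hx, List.map_append, List.map_singleton,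
          ofList_append_singleton, ih]

theorem foldl_modify_add_items {α β : Type} [BEq α] [LawfulBEq α] [BEq β] [LawfulBEq β]
    (ps : List (α × Int)) (f : α → β) :
    (ps.foldl (fun (d : PySem.Dict β Int) p => d.modify (f p.1) 0 (· + p.2)) PySem.Dict.empty).items
      = (PySem.Set.ofList (ps.map (fun p => f p.1))).map
          (fun k => (k, ((ps.filter (fun p => f p.1 == k)).map (·.2)).sum)) := by
  induction ps using List.reverseRecOn with
  | nil => rfl
  | append_singleton t q ih =>
    rw [List.foldl_append]
    set D := t.foldl (fun (d : PySem.Dict β Int) p => d.modify (f p.1) 0 (· + p.2)) PySem.Dict.empty with hD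
    set S := PySem.Set.ofList (t.map (fun p => f p.1)) with hS
    have hkeys : D.keys = S := by
      show D.items.map (·.1) = S
      rw [ih]
      simp only [List.map_map]
      exact List.map_id'' (fun _ => rfl) S
    have hnd : D.keys.Nodup := by rw [hkeys]; exact PySem.Set.nodup_ofList _
    have hofnew : PySem.Set.ofList ((t ++ [q]).map (fun p => f p.1))
        = PySem.Set.add S (f q.1) := by
      rw [List.map_append, List.map_singleton, ofList_append_singleton]
    simp only [List.foldl_cons, List.foldl_nil, PySem.Dict.modify]
    by_cases hmem : f q.1 ∈ S
    · have hcont : D.contains (f q.1) = true := by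
        rw [PySem.Dict.contains_iff_mem_keys, hkeys]; exact hmem
      have hgetD : D.getD (f q.1) 0
          = ((t.filter (fun p => f p.1 == f q.1)).map (·.2)).sum := by
        apply PySem.Dict.getD_of_mem_items D _ hnd
        rw [ih]
        exact List.mem_map_of_mem hmem
      rw [PySem.Dict.items_insert_of_contains D _ hcont, ih, hofnew,
          PySem.Set.add_of_mem hmem, List.map_map]
      apply List.map_congr_left
      intro k hk
      by_cases hkq : k = f q.1
      · subst hkq
        simp only [Function.comp, BEq.rfl, if_pos]
        simp [List.filter_append, hgetD]
      · have : (k == f q.1) = false := by simp [hkq]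
        simp only [Function.comp, this, if_neg, Bool.false_eq_true, not_false_iff]
        simp [List.filter_append, Ne.symm hkq]
    · have hcont : D.contains (f q.1) = false := by
        rw [Bool.eq_false_iff, ne_eq, PySem.Dict.contains_iff_mem_keys, hkeys]
        exact hmem
      have hgetD : D.getD (f q.1) 0 = 0 := PySem.Dict.getD_of_not_contains D 0 hcont
      have hfilt : t.filter (fun p => f p.1 == f q.1) = [] := by
        rw [List.filter_eq_nil_iff]
        intro p hp hbeq
        apply hmem
        rw [hS, PySem.Set.mem_ofList]
        exact (eq_of_beq hbeq) ▸ List.mem_map_of_mem hp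
      rw [PySem.Dict.items_insert_of_not_contains D _ hcont, ih, hofnew,
          PySem.Set.add_of_not_mem hmem, List.map_append]
      congr 1
      · apply List.map_congr_left
        intro k hk
        have hkq : ¬ (f q.1 = k) := fun h => hmem (h ▸ hk)
        simp [List.filter_append, hkq]
      · simp [List.filter_append, hfilt, hgetD]

theorem sum_counts_filter {α β : Type} [BEq α] [LawfulBEq α] [BEq β] [LawfulBEq β]
    (l : List α) (f : α → β) (k : β) :
    ((((PySem.Set.ofList l).filter (fun g => f g == k)).map (fun g => (l.count g : Int))).sum)
      = ((l.map f).count k : Int) := by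
  induction l using List.reverseRecOn with
  | nil => rfl
  | append_singleton t x ih =>
    rw [ofList_append_singleton]
    have hcnt : ∀ g, ((t ++ [x]).count g : Int)
        = (t.count g : Int) + (if g == x then 1 else 0) := by
      intro g
      rw [List.count_append, List.count_singleton]
      by_cases h : x = g
      · subst h; simp
      · simp [h, Ne.symm h]
    have hrhs : (((t ++ [x]).map f).count k : Int)
        = ((t.map f).count k : Int) + (if f x == k then 1 else 0) := by
      rw [List.map_append, List.count_append, List.map_singleton, List.count_singleton]
      by_cases h : f x = k <;> simp [h]
    rw [hrhs]
    by_cases hx : x ∈ PySem.Set.ofList t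
    · rw [PySem.Set.add_of_mem hx]
      have hmc : ((PySem.Set.ofList t).filter (fun g => f g == k)).map
            (fun g => ((t ++ [x]).count g : Int))
          = ((PySem.Set.ofList t).filter (fun g => f g == k)).map
            (fun g => (t.count g : Int) + (if g == x then 1 else 0)) :=
        List.map_congr_left (fun g _ => hcnt g)
      rw [hmc, PySem.List.sum_map_add_int, ih]
      congr 1
      rw [PySem.List.sum_map_ite_one_zero (fun g => g == x), ← List.count_eq_countP']
      have hnd : ((PySem.Set.ofList t).filter (fun g => f g == k)).Nodup :=
        (PySem.Set.nodup_ofList t).filter _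
      by_cases hfx : f x = k
      · have hxmem : x ∈ (PySem.Set.ofList t).filter (fun g => f g == k) := by
          rw [List.mem_filter]
          exact ⟨hx, by simp [hfx]⟩
        rw [List.count_eq_one_of_mem hnd hxmem]
        simp [hfx]
      · have hxnot : x ∉ (PySem.Set.ofList t).filter (fun g => f g == k) := by
          rw [List.mem_filter]
          rintro ⟨-, hb⟩
          exact hfx (by simpa using hb)
        rw [List.count_eq_zero.2 hxnot]
        simp [hfx]
    · rw [PySem.Set.add_of_not_mem hx, List.filter_append, List.map_append, List.sum_append]
      have hxt : x ∉ t := fun h => hx ((PySem.Set.mem_ofList t x).2 h)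
      have hmc : ((PySem.Set.ofList t).filter (fun g => f g == k)).map
            (fun g => ((t ++ [x]).count g : Int))
          = ((PySem.Set.ofList t).filter (fun g => f g == k)).map
            (fun g => (t.count g : Int)) := by
        apply List.map_congr_left
        intro g hg
        have hgx : ¬ (g = x) := by
          intro h
          exact hx (h ▸ (List.mem_filter.1 hg).1)
        rw [hcnt g]
        simp [hgx]
      rw [hmc, ih]
      by_cases hfx : f x = k
      · simp [hfx, List.count_append, List.count_eq_zero.2 hxt]
      · simp [hfx]

theorem counter_items_foldl_modify {α β : Type} [BEq α] [LawfulBEq α] [BEq β] [LawfulBEq β]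
    (l : List α) (f : α → β) :
    (PySem.Dict.counter l).items.foldl
        (fun (d : PySem.Dict β Int) p => d.modify (f p.1) 0 (· + p.2)) PySem.Dict.empty
      = PySem.Dict.counter (l.map f) := by
  apply PySem.Dict.ext
  rw [foldl_modify_add_items, PySem.Dict.items_counter l, PySem.Dict.items_counter (List.map f l)]
  rw [List.map_map]
  have hmap : List.map ((fun (p : α × Int) => f p.1) ∘ fun k => (k, (l.count k : Int)))
      (PySem.Set.ofList l) = (PySem.Set.ofList l).map f := rfl
  rw [hmap, ofList_map_ofList]
  apply List.map_congr_left
  intro k hk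
  congr 1
  rw [List.filter_map, List.map_map]
  have h1 : ((fun (p : α × Int) => f p.1 == k) ∘ fun g => (g, (l.count g : Int)))
      = (fun g => f g == k) := rfl
  have h2 : ((fun (p : α × Int) => p.2) ∘ fun g => (g, (l.count g : Int)))
      = (fun g => (l.count g : Int)) := rfl
  rw [h1, h2]
  exact sum_counts_filter l f k

theorem build_ngram_counts_spec' : ∀ (processed_corpus : List (List String)) (n : Int),
    1 ≤ n → build_ngram_counts processed_corpus n = build_ngram_counts_alt processed_corpus n := by
  intro corpus n hn
  have hcnt : ∀ (key : List String → List String)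
      (d0 : PySem.Dict (List String) Int),
      corpus.foldl
        (fun d sentence =>
          (PySem.List.pyRange 0 ((sentence.length : Int) - n + 1) 1).foldl
            (fun d i => d.modify (key (PySem.List.slice sentence (some i) (some (i + n)))) 0 (· + 1)) d)
        d0
      = ((corpus.flatMap (fun s =>
            (PySem.List.pyRange 0 ((s.length : Int) - n + 1) 1).map
              (fun i => PySem.List.slice s (some i) (some (i + n))))).map key).foldl
          (fun d g => d.modify g 0 (· + 1)) d0 := by
    intro key d0
    rw [List.map_flatMap]
    rw [← foldl_foldl_eq_foldl_flatMap]
    apply PySem.List.foldl_congr_mem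
    intro acc s _
    rw [List.map_map, List.foldl_map]
    rfl
  -- A's fused pair loop splits into two independent counting loops
  have hA : build_ngram_counts corpus n
      = (((corpus.flatMap (fun s =>
            (PySem.List.pyRange 0 ((s.length : Int) - n + 1) 1).map
              (fun i => PySem.List.slice s (some i) (some (i + n))))).foldl
            (fun d g => d.modify g 0 (· + 1)) PySem.Dict.empty).items,
         (((corpus.flatMap (fun s =>
            (PySem.List.pyRange 0 ((s.length : Int) - n + 1) 1).map
              (fun i => PySem.List.slice s (some i) (some (i + n))))).map List.dropLast).foldl
            (fun d g => d.modify g 0 (· + 1)) PySem.Dict.empty).items) := by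
    simp only [build_ngram_counts]
    have hsplit : corpus.foldl
        (fun (st : PySem.Dict (List String) Int × PySem.Dict (List String) Int) sentence =>
          (PySem.List.pyRange 0 ((sentence.length : Int) - n + 1) 1).foldl
            (fun st i =>
              (st.1.modify (PySem.List.slice sentence (some i) (some (i + n))) 0 (· + 1),
               st.2.modify (PySem.List.slice sentence (some i) (some (i + n - 1))) 0 (· + 1)))
            st)
        (PySem.Dict.empty, PySem.Dict.empty)
        = (corpus.foldl
            (fun d sentence =>
              (PySem.List.pyRange 0 ((sentence.length : Int) - n + 1) 1).foldl
                (fun d i => d.modify (id (PySem.List.slice sentence (some i) (some (i + n)))) 0 (· + 1)) d)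
            PySem.Dict.empty,
           corpus.foldl
            (fun d sentence =>
              (PySem.List.pyRange 0 ((sentence.length : Int) - n + 1) 1).foldl
                (fun d i => d.modify (List.dropLast (PySem.List.slice sentence (some i) (some (i + n)))) 0 (· + 1)) d)
            PySem.Dict.empty) := by
      rw [PySem.List.foldl_congr_mem _ _
        (fun (st : PySem.Dict (List String) Int × PySem.Dict (List String) Int)
             (sentence : List String) =>
          ((PySem.List.pyRange 0 ((sentence.length : Int) - n + 1) 1).foldl
              (fun d i => PySem.Dict.modify d (id (PySem.List.slice sentence (some i) (some (i + n)))) 0 (· + 1)) st.1,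
           (PySem.List.pyRange 0 ((sentence.length : Int) - n + 1) 1).foldl
              (fun d i => PySem.Dict.modify d (List.dropLast (PySem.List.slice sentence (some i) (some (i + n)))) 0 (· + 1)) st.2)) _
        (by
          intro st s _
          rw [PySem.List.foldl_congr_mem _ _
            (fun (st : PySem.Dict (List String) Int × PySem.Dict (List String) Int) i =>
              (st.1.modify (id (PySem.List.slice s (some i) (some (i + n)))) 0 (· + 1),
               st.2.modify (List.dropLast (PySem.List.slice s (some i) (some (i + n)))) 0 (· + 1))) _
            (by
              intro acc i hi
              rcases PySem.List.mem_pyRange_one.1 hi with ⟨h0, h1⟩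
              rw [context_slice_eq s n i hn h0 (by omega)]
              rfl)]
          exact PySem.List.foldl_prod_mk
            (f := fun d i => PySem.Dict.modify d (id (PySem.List.slice s (some i) (some (i + n)))) 0 (· + 1))
            (g := fun d i => PySem.Dict.modify d (List.dropLast (PySem.List.slice s (some i) (some (i + n)))) 0 (· + 1))
            _ _ _)]
      exact PySem.List.foldl_prod_mk
        (f := fun (d : PySem.Dict (List String) Int) (sentence : List String) =>
          (PySem.List.pyRange 0 ((sentence.length : Int) - n + 1) 1).foldl
            (fun d i => PySem.Dict.modify d (id (PySem.List.slice sentence (some i) (some (i + n)))) 0 (· + 1)) d)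
        (g := fun (d : PySem.Dict (List String) Int) (sentence : List String) =>
          (PySem.List.pyRange 0 ((sentence.length : Int) - n + 1) 1).foldl
            (fun d i => PySem.Dict.modify d (List.dropLast (PySem.List.slice sentence (some i) (some (i + n)))) 0 (· + 1)) d)
        _ _ _
    rw [hsplit, hcnt id, hcnt List.dropLast]
    simp only [List.map_id]
  have hB : build_ngram_counts_alt corpus n
      = (((corpus.flatMap (fun s =>
            (PySem.List.pyRange 0 ((s.length : Int) - n + 1) 1).map
              (fun i => PySem.List.slice s (some i) (some (i + n))))).foldl
            (fun d g => d.modify g 0 (· + 1)) PySem.Dict.empty).items,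
         (((corpus.flatMap (fun s =>
            (PySem.List.pyRange 0 ((s.length : Int) - n + 1) 1).map
              (fun i => PySem.List.slice s (some i) (some (i + n))))).map List.dropLast).foldl
            (fun d g => d.modify g 0 (· + 1)) PySem.Dict.empty).items) := by
    simp only [build_ngram_counts_alt]
    have h1 := hcnt id PySem.Dict.empty
    simp only [List.map_id] at h1
    have h1' : corpus.foldl
        (fun (d : PySem.Dict (List String) Int) sentence =>
          (PySem.List.pyRange 0 ((sentence.length : Int) - n + 1) 1).foldl
            (fun d i => d.modify (PySem.List.slice sentence (some i) (some (i + n))) 0 (· + 1)) d)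
        PySem.Dict.empty
        = (corpus.flatMap (fun s =>
            (PySem.List.pyRange 0 ((s.length : Int) - n + 1) 1).map
              (fun i => PySem.List.slice s (some i) (some (i + n))))).foldl
          (fun d g => d.modify g 0 (· + 1)) PySem.Dict.empty := h1
    rw [show (fun (d : PySem.Dict (List String) Int) (p : List String × Int) =>
          d.modify (PySem.List.slice p.1 none (some (-1))) 0 (· + p.2))
        = (fun (d : PySem.Dict (List String) Int) p => d.modify p.1.dropLast 0 (· + p.2)) from
      funext fun d => funext fun p => by rw [slice_to_neg_one]]
    rw [h1', ← PySem.Dict.counter_eq_foldl,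
        counter_items_foldl_modify _ List.dropLast, ← PySem.Dict.counter_eq_foldl]
  rw [hA, hB]

-- ===== VERDICT (by name: the statement is the Claim_ definition above) =====
theorem build_ngram_counts_spec : Claim_equal_build_ngram_counts := by
  intro processed_corpus n _hdom hpre
  unfold Spec_build_ngram_counts
  exact build_ngram_counts_spec' processed_corpus n hpre
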